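-- pv_equiv track=rewrite | github.com/khkim1/hmm-sonnet | train_hmm_rhyme.py | get_punc_prob_dict
-- ===== SOURCE A (Python) =====
-- def get_punc_prob_dict(lines):
-- 	''' Get the probability of each line ending puncation in lines. Ignore
-- 	periods.'''
-- 	count = 0
-- 	res = {end: 0 for end in [',', ';', ':', '-']}
-- 	for line in lines:
-- 		line_end = line[-1]
-- 		if line_end in [',', ';', ':', '-']:
-- 			count += 1
-- 			res[line_end] += 1
-- 	return res
-- ===== SOURCE B (Python) =====
-- def get_punc_prob_dict(lines):
--     ''' Get the probability of each line ending puncation in lines. Ignore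
--     periods.'''
--     lines = list(lines)
--     KEYS = (',', ';', ':', '-')
--
--     def go(chunk):
--         if not chunk:
--             return {k: 0 for k in KEYS}
--         if len(chunk) == 1:
--             e = chunk[0][-1]
--             return {k: (1 if k == e else 0) for k in KEYS}
--         mid = len(chunk) // 2
--         left = go(chunk[:mid])
--         right = go(chunk[mid:])
--         return {k: left[k] + right[k] for k in KEYS}
--
--     return go(lines)
-- ===== Notes on version B (the rewrite author's own statement) =====
-- stated objective: alternative
-- what changed: Replaces A's single left-to-right tally loop by a divide-and-conquer recursion: split the line list in half, recursively build each half's per-key count dict, and merge the two dicts by key-wise addition.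
import Mathlib
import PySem

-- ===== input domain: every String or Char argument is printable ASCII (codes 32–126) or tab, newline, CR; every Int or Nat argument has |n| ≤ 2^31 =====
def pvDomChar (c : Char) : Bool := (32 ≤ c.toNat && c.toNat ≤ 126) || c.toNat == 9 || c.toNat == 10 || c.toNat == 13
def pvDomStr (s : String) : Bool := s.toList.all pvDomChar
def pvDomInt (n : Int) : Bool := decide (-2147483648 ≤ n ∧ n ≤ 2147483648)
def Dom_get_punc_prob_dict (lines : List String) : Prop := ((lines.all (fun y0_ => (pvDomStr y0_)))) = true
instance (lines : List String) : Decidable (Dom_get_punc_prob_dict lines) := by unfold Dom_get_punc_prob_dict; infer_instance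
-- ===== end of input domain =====

-- B counts by divide-and-conquer: split the list in half, recursively count each half, merge the dicts key-wise (alternative algorithm, same result).

-- ===== PORT A =====
-- A's loop: for each line take line[-1]; if it is one of ',' ';' ':' '-', bump count and res[line_end].
-- The state is (count, res) exactly as in the Python (count is dead for the return value but carried faithfully).
def get_punc_prob_dict (lines : List String) : List (String × Int) :=
  let res : PySem.Dict String Int :=
    ([",", ";", ":", "-"]).foldl (fun d e => d.insert e 0) PySem.Dict.empty
  let st : Int × PySem.Dict String Int :=
    lines.foldl (fun st line =>
      match PySem.Str.pyGet? line (-1) with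
      | none => st  -- Python raises IndexError here; such inputs are outside Pre_
      | some c =>
        let line_end := String.ofList [c]
        if line_end ∈ [",", ";", ":", "-"] then
          (st.1 + 1, st.2.insert line_end (st.2.getD line_end 0 + 1))
        else st) (0, res)
  st.2.items

-- ===== PORT B =====
-- B's fixed key tuple (',', ';', ':', '-')
def pvKeysB : List String := [",", ";", ":", "-"]
-- Python left[k] on a dict whose keys are exactly pvKeysB (always present there)
def pvLook (d : List (String × Int)) (k : String) : Int := (d.lookup k).getD 0
-- go(chunk): empty -> all-zero dict; singleton -> indicator dict of chunk[0][-1];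
-- else split at len//2, recurse on both halves, merge key-wise.
-- The fuel argument (chunk.length at the top call) only makes the halving recursion
-- structural; it never changes which branch runs.
def pvGoB : Nat → List String → List (String × Int)
  | 0, _ => pvKeysB.map (fun k => (k, (0 : Int)))
  | fuel + 1, chunk =>
    if chunk.isEmpty then pvKeysB.map (fun k => (k, (0 : Int)))
    else if chunk.length = 1 then
      -- chunk[0][-1]; an empty line raises in Python (outside Pre_), "" stands for that dead branch
      let e := match PySem.Str.pyGet? chunk.headI (-1) with
               | some c => String.ofList [c]
               | none => ""
      pvKeysB.map (fun k => (k, if k = e then (1 : Int) else 0))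
    else
      let mid := chunk.length / 2
      let left := pvGoB fuel (chunk.take mid)
      let right := pvGoB fuel (chunk.drop mid)
      pvKeysB.map (fun k => (k, pvLook left k + pvLook right k))
def get_punc_prob_dict_alt (lines : List String) : List (String × Int) :=
  pvGoB lines.length lines

-- ===== PRECONDITION & SPEC =====
-- Pre_ excludes lists containing an empty line, on which the Python A raises IndexError (line[-1]).
def Pre_get_punc_prob_dict (lines : List String) : Prop := ∀ l ∈ lines, l ≠ ""
instance (lines : List String) : Decidable (Pre_get_punc_prob_dict lines) := by unfold Pre_get_punc_prob_dict; infer_instance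
def pvWitness_get_punc_prob_dict : List String := ["one,", "two;", "three"]
def Spec_get_punc_prob_dict (lines : List String) (out : List (String × Int)) : Prop := out = get_punc_prob_dict_alt lines
instance (lines : List String) (out : List (String × Int)) : Decidable (Spec_get_punc_prob_dict lines out) := by unfold Spec_get_punc_prob_dict; infer_instance

-- ===== CLAIM (what is proved, stated in full; the proofs are below) =====
def Claim_equal_get_punc_prob_dict : Prop := ∀ (lines : List String), Dom_get_punc_prob_dict lines → Pre_get_punc_prob_dict lines → Spec_get_punc_prob_dict lines (get_punc_prob_dict lines)

-- ===== LEMMAS AND PROOFS =====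

-- the "ending string" of a line, as pvGoB's singleton case computes it
def pvEnd (l : String) : String :=
  match PySem.Str.pyGet? l (-1) with
  | some c => String.ofList [c]
  | none => ""

-- A nonempty line has a last character.
lemma endLast (l : String) (h : l ≠ "") : ∃ ch, PySem.Str.pyGet? l (-1) = some ch := by
  have hne : l.toList ≠ [] := by
    intro he; apply h
    simpa using String.toList_inj.mp (by simpa using he)
  rw [PySem.Str.pyGet?, PySem.Chars.pyGet?, PySem.List.pyGet?_neg_one]
  exact Option.isSome_iff_exists.mp (List.getLast?_isSome.mpr hne)

-- Characterization of B's divide and conquer: with enough fuel, pvGoB is the ending-count table.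
lemma pvGoB_eq (fuel : Nat) : ∀ (chunk : List String), chunk.length ≤ fuel →
    pvGoB fuel chunk = pvKeysB.map (fun k => (k, ((chunk.map pvEnd).count k : Int))) := by
  induction fuel with
  | zero =>
    intro chunk hle
    have : chunk = [] := List.length_eq_zero_iff.mp (Nat.le_zero.mp hle)
    subst this; rfl
  | succ fuel ih =>
    intro chunk hle
    by_cases hemp : chunk.isEmpty
    · rw [pvGoB]
      simp [hemp, List.isEmpty_iff.mp hemp]
    · by_cases h1 : chunk.length = 1
      · rw [pvGoB]
        simp only [hemp, if_false, h1, if_pos, Bool.false_eq_true]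
        obtain ⟨l, hl⟩ : ∃ l, chunk = [l] := List.length_eq_one_iff.mp h1
        subst hl
        show pvKeysB.map (fun k => (k, if k = pvEnd l then (1 : Int) else 0)) = _
        apply List.map_congr_left
        intro k _
        rw [Prod.mk.injEq]
        refine ⟨rfl, ?_⟩
        have hc : ([pvEnd l].count k) = if pvEnd l = k then 1 else 0 := by
          simp [List.count_cons]
        rw [List.map_cons, List.map_nil, hc]
        by_cases hq : k = pvEnd l
        · simp [hq]
        · simp [hq, Ne.symm hq]
      · have hlen0 : chunk.length ≠ 0 := by
          simpa [List.isEmpty_iff_length_eq_zero] using hemp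
        have hlen2 : 2 ≤ chunk.length := by omega
        rw [pvGoB]
        simp only [hemp, if_false, h1, Bool.false_eq_true]
        show pvKeysB.map (fun k => (k, pvLook (pvGoB fuel (chunk.take (chunk.length / 2))) k
              + pvLook (pvGoB fuel (chunk.drop (chunk.length / 2))) k)) = _
        set mid := chunk.length / 2 with hmid
        have hmid1 : 1 ≤ mid := by omega
        have hmidlt : mid < chunk.length := by omega
        rw [ih (chunk.take mid) (by simp [List.length_take]; omega),
            ih (chunk.drop mid) (by simp [List.length_drop]; omega)]
        apply List.map_congr_left
        intro k hk
        have hlook : ∀ xs : List String,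
            pvLook (pvKeysB.map (fun k => (k, ((xs.map pvEnd).count k : Int)))) k
              = ((xs.map pvEnd).count k : Int) := by
          intro xs
          fin_cases hk <;> simp [pvLook, pvKeysB, List.lookup]
        rw [hlook, hlook, Prod.mk.injEq]
        refine ⟨rfl, ?_⟩
        have hsplit : chunk.take mid ++ chunk.drop mid = chunk := List.take_append_drop mid chunk
        have hcnt : (chunk.map pvEnd).count k
            = ((chunk.take mid).map pvEnd).count k + ((chunk.drop mid).map pvEnd).count k := by
          conv_lhs => rw [← hsplit]
          rw [List.map_append, List.count_append]
        rw [hcnt]; push_cast; ring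
-- under Pre_, counting ending-strings equals counting optional last chars
lemma count_end_eq (lines : List String) (h : ∀ l ∈ lines, l ≠ "") (ch : Char) :
    ((lines.map pvEnd).count (String.ofList [ch]) : Int)
      = ((lines.map (fun l => PySem.Str.pyGet? l (-1))).count (some ch) : Int) := by
  induction lines with
  | nil => simp
  | cons l ls ih =>
    obtain ⟨c, hc⟩ := endLast l (h l (List.mem_cons_self ..))
    have htail := ih (fun x hx => h x (List.mem_cons_of_mem _ hx))
    have hend : pvEnd l = String.ofList [c] := by unfold pvEnd; rw [hc]
    have hbe : (String.ofList [c] == String.ofList [ch]) = ((PySem.Str.pyGet? l (-1)) == some ch) := by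
      rw [hc]
      by_cases hq : c = ch
      · subst hq; simp
      · have hne : String.ofList [c] ≠ String.ofList [ch] := fun he =>
          hq (by have := congrArg String.toList he; simpa using this)
        simp [hq, hne]
    simp only [List.map_cons, List.count_cons, hend, hbe]
    push_cast
    omega
-- Invariant of A's fold: starting from the four-key dict with arbitrary current counts,
-- processing `lines` adds to each key the number of lines whose last char is that key.
lemma foldA_items (lines : List String) (h : ∀ l ∈ lines, l ≠ "") (n a b c d : Int) :
    (lines.foldl (fun st line =>
      match PySem.Str.pyGet? line (-1) with
      | none => st
      | some ch =>
        let line_end := String.ofList [ch]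
        if line_end ∈ [",", ";", ":", "-"] then
          (st.1 + 1, st.2.insert line_end (st.2.getD line_end 0 + 1))
        else st)
      ((n, PySem.Dict.mk [(",", a), (";", b), (":", c), ("-", d)]) : Int × PySem.Dict String Int)).2.items
    = [(",", a + ((lines.map (fun l => PySem.Str.pyGet? l (-1))).count (some ',') : Int)),
       (";", b + ((lines.map (fun l => PySem.Str.pyGet? l (-1))).count (some ';') : Int)),
       (":", c + ((lines.map (fun l => PySem.Str.pyGet? l (-1))).count (some ':') : Int)),
       ("-", d + ((lines.map (fun l => PySem.Str.pyGet? l (-1))).count (some '-') : Int))] := by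
  induction lines generalizing n a b c d with
  | nil => simp
  | cons l ls ih =>
    obtain ⟨ch, hch⟩ := endLast l (h l (List.mem_cons_self ..))
    have htail : ∀ x ∈ ls, x ≠ "" := fun x hx => h x (List.mem_cons_of_mem _ hx)
    simp only [List.foldl_cons, hch, List.map_cons, List.count_cons]
    by_cases h1 : ch = ','
    · subst h1
      have hins : ((PySem.Dict.mk [(",", a), (";", b), (":", c), ("-", d)]).insert (String.ofList [','])
            ((PySem.Dict.mk [(",", a), (";", b), (":", c), ("-", d)]).getD (String.ofList [',']) 0 + 1))
          = PySem.Dict.mk [(",", a + 1), (";", b), (":", c), ("-", d)] := by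
        apply PySem.Dict.ext
        simp [PySem.Dict.items_insert_of_contains, PySem.Dict.getD, PySem.Dict.get?_mk_cons]
      rw [if_pos (by decide : String.ofList [','] ∈ [",", ";", ":", "-"]), hins, ih htail]
      simp [add_assoc]; omega
    · by_cases h2 : ch = ';'
      · subst h2
        have hins : ((PySem.Dict.mk [(",", a), (";", b), (":", c), ("-", d)]).insert (String.ofList [';'])
              ((PySem.Dict.mk [(",", a), (";", b), (":", c), ("-", d)]).getD (String.ofList [';']) 0 + 1))
            = PySem.Dict.mk [(",", a), (";", b + 1), (":", c), ("-", d)] := by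
          apply PySem.Dict.ext
          simp [PySem.Dict.items_insert_of_contains, PySem.Dict.getD, PySem.Dict.get?_mk_cons]
        rw [if_pos (by decide : String.ofList [';'] ∈ [",", ";", ":", "-"]), hins, ih htail]
        simp [add_assoc]; omega
      · by_cases h3 : ch = ':'
        · subst h3
          have hins : ((PySem.Dict.mk [(",", a), (";", b), (":", c), ("-", d)]).insert (String.ofList [':'])
                ((PySem.Dict.mk [(",", a), (";", b), (":", c), ("-", d)]).getD (String.ofList [':']) 0 + 1))
              = PySem.Dict.mk [(",", a), (";", b), (":", c + 1), ("-", d)] := by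
            apply PySem.Dict.ext
            simp [PySem.Dict.items_insert_of_contains, PySem.Dict.getD, PySem.Dict.get?_mk_cons]
          rw [if_pos (by decide : String.ofList [':'] ∈ [",", ";", ":", "-"]), hins, ih htail]
          simp [add_assoc]; omega
        · by_cases h4 : ch = '-'
          · subst h4
            have hins : ((PySem.Dict.mk [(",", a), (";", b), (":", c), ("-", d)]).insert (String.ofList ['-'])
                  ((PySem.Dict.mk [(",", a), (";", b), (":", c), ("-", d)]).getD (String.ofList ['-']) 0 + 1))
                = PySem.Dict.mk [(",", a), (";", b), (":", c), ("-", d + 1)] := by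
              apply PySem.Dict.ext
              simp [PySem.Dict.items_insert_of_contains, PySem.Dict.getD, PySem.Dict.get?_mk_cons]
            rw [if_pos (by decide : String.ofList ['-'] ∈ [",", ";", ":", "-"]), hins, ih htail]
            simp [add_assoc]; omega
          · have hmem : String.ofList [ch] ∉ ([",", ";", ":", "-"] : List String) := by
              intro hm
              simp only [List.mem_cons, List.not_mem_nil, or_false] at hm
              rcases hm with he | he | he | he
              · exact h1 (by simpa using congrArg String.toList he)
              · exact h2 (by simpa using congrArg String.toList he)
              · exact h3 (by simpa using congrArg String.toList he)
              · exact h4 (by simpa using congrArg String.toList he)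
            rw [if_neg hmem, ih htail]
            simp [h1, h2, h3, h4]

-- ===== VERDICT (by name: the statement is the Claim_ definition above) =====
theorem get_punc_prob_dict_spec : Claim_equal_get_punc_prob_dict := by
  intro lines _ hpre
  show get_punc_prob_dict lines = get_punc_prob_dict_alt lines
  unfold get_punc_prob_dict get_punc_prob_dict_alt
  have hinit : (([",", ";", ":", "-"] : List String).foldl (fun d e => d.insert e 0) PySem.Dict.empty)
      = PySem.Dict.mk [(",", (0:Int)), (";", 0), (":", 0), ("-", 0)] := rfl
  rw [hinit, foldA_items lines hpre 0 0 0 0 0, pvGoB_eq lines.length lines le_rfl]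
  have h1 := count_end_eq lines hpre ','
  have h2 := count_end_eq lines hpre ';'
  have h3 := count_end_eq lines hpre ':'
  have h4 := count_end_eq lines hpre '-'
  simp only [pvKeysB, List.map_cons, List.map_nil]
  have e1 : ("," : String) = String.ofList [','] := rfl
  have e2 : (";" : String) = String.ofList [';'] := rfl
  have e3 : (":" : String) = String.ofList [':'] := rfl
  have e4 : ("-" : String) = String.ofList ['-'] := rfl
  rw [e1, e2, e3, e4, h1, h2, h3, h4]
  simp
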